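-- pv_equiv track=rewrite | github.com/rmfulton/AdventOfCode2023 | day21/sol2.py | sideContribution
-- ===== SOURCE A (Python) =====
-- def distances(lines, pt):
--     d = []
--     frontier = {pt}
--     visited = {pt}
--     while len(frontier):
--         d.append(len(frontier))
--         newf = set()
--         for p in frontier:
--             for n in valid_neighbors(lines, p):
--                 if n not in visited:
--                     visited.add(n)
--                     newf.add(n)
--         frontier = newf
--     return d
--
-- def valid_neighbors(lines, p):
--     options = [(p[0], p[1] + 1), (p[0], p[1] - 1), (p[0] - 1, p[1]), (p[0] + 1, p[1])]
--     in_bounds = lambda p: 0 <= p[0] < len(lines) and 0 <= p[1] < len(lines[0])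
--     is_dot = lambda p: lines[p[0]][p[1]] in ".S"
--     return list(filter(lambda x: in_bounds(x) and is_dot(x), options))
--
-- def sideContribution(start, lines, S, pt):
--     n, m = len(lines), len(lines[0])
--     w = m if start[0] == pt[0] else n
--     d = distances(lines, pt)
--     initial = taxicab_d(start, pt, (n,m))
--     res = 0
--     for b in range((S-initial)//w + 1):
--         remaining = S - initial - b*w
--         res += reachable(d,remaining)
--     return res
--
-- def taxicab_d(origin, p, dim):
--     x = (dim[0] - abs(p[0] - origin[0])) % dim[0]
--     y = (dim[1] - abs(p[1] - origin[1])) % dim[1]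
--     return x + y
--
-- def reachable(d, remaining):
--     res = 0
--     for i in range(len(d)):
--         if i > remaining: break
--         if (remaining - i) % 2 == 0:
--             res += d[i]
--     return res
-- ===== SOURCE B (Python) =====
-- # B: one pass over the BFS distance histogram with a closed-form count of
-- # grid-copy offsets per distance, instead of A's rescan of d for every offset b.
--
-- def distances(lines, pt):
--     d = []
--     frontier = {pt}
--     visited = {pt}
--     while len(frontier):
--         d.append(len(frontier))
--         newf = set()
--         for p in frontier:
--             for n in valid_neighbors(lines, p):
--                 if n not in visited:
--                     visited.add(n)
--                     newf.add(n)
--         frontier = newf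
--     return d
--
-- def valid_neighbors(lines, p):
--     options = [(p[0], p[1] + 1), (p[0], p[1] - 1), (p[0] - 1, p[1]), (p[0] + 1, p[1])]
--     in_bounds = lambda p: 0 <= p[0] < len(lines) and 0 <= p[1] < len(lines[0])
--     is_dot = lambda p: lines[p[0]][p[1]] in ".S"
--     return list(filter(lambda x: in_bounds(x) and is_dot(x), options))
--
-- def offset_count(r, w):
--     # number of offsets b >= 0 with b*w <= r and (r - b*w) even
--     if r < 0:
--         return 0
--     q = r // w
--     if w % 2 == 0:
--         return q + 1 if r % 2 == 0 else 0
--     return (q - r % 2) // 2 + 1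
--
-- def sideContribution(start, lines, S, pt):
--     n, m = len(lines), len(lines[0])
--     w = m if start[0] == pt[0] else n
--     d = distances(lines, pt)
--     x = (n - abs(pt[0] - start[0])) % n
--     y = (m - abs(pt[1] - start[1])) % m
--     r0 = S - x - y
--     res = 0
--     for i, di in enumerate(d):
--         res += di * offset_count(r0 - i, w)
--     return res
-- ===== Notes on version B (the rewrite author's own statement) =====
-- stated objective: alternative
-- what changed: A loops over every grid-copy offset b up to (S-initial)//w and rescans the BFS distance histogram d for each; B makes a single pass over d, multiplying each count by a closed-form number of offsets with matching parity, so the offset loop disappears (the shared BFS dominates the measured time, so no speedup was recorded).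
-- outside the precondition, e.g. on sideContribution((0, 0), ['#.#', '#', '###'], 5, (2, 0)): A returns 1, B returns 1
import Mathlib
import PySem

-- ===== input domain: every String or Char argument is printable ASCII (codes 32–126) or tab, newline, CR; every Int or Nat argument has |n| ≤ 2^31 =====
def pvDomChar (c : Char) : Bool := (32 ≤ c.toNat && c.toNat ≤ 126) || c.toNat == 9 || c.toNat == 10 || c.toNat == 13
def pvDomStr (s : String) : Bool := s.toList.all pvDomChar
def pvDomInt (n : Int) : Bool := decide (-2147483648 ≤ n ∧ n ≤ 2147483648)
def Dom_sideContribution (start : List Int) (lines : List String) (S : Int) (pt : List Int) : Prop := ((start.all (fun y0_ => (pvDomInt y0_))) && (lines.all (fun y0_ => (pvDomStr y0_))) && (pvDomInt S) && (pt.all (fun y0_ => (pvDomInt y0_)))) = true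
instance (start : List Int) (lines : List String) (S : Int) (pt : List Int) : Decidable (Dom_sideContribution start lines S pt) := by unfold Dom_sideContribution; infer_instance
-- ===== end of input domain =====

-- B replaces A's per-offset rescan of the BFS distance histogram by one pass over the
-- histogram with a closed-form count of offsets per distance (objective: alternative).
-- Grid positions (Python tuples) are modelled as List Int.

-- ===== PORT A =====

-- helper valid_neighbors (shared verbatim by A and B in Python; where Python would
-- raise IndexError reading past a short row, PySem.Str.pyGet? is none — those
-- inputs are excluded by Pre_ below)
def pvValidNeighbors (lines : List String) (p : List Int) : List (List Int) :=
  let p0 := PySem.List.pyGetD p 0 0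
  let p1 := PySem.List.pyGetD p 1 0
  ([[p0, p1 + 1], [p0, p1 - 1], [p0 - 1, p1], [p0 + 1, p1]]).filter (fun x =>
    let x0 := PySem.List.pyGetD x 0 0
    let x1 := PySem.List.pyGetD x 1 0
    (decide (0 ≤ x0) && decide (x0 < (lines.length : Int)) &&
     decide (0 ≤ x1) && decide (x1 < PySem.Str.len (PySem.List.pyGetD lines 0 ""))) &&
    (match PySem.Str.pyGet? (PySem.List.pyGetD lines x0 "") x1 with
     | some c => c == '.' || c == 'S'
     | none => false))

-- the body of A's while-loop: builds newf and extends visited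
def pvBfsStep (lines : List String) (frontier visited : PySem.Set (List Int)) :
    PySem.Set (List Int) × PySem.Set (List Int) :=
  frontier.foldl (fun acc p =>
    (pvValidNeighbors lines p).foldl (fun acc2 nb =>
      if PySem.Set.contains acc2.2 nb then acc2
      else (PySem.Set.add acc2.1 nb, PySem.Set.add acc2.2 nb)) acc)
    (PySem.Set.empty, visited)

-- A's while-loop; the fuel only makes it total (n*m+2 iterations always suffice:
-- every round's frontier consists of freshly visited cells of the n×m grid)
def pvDistancesGo (lines : List String) (fuel : Nat)
    (frontier visited : PySem.Set (List Int)) (d : List Int) : List Int :=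
  match fuel with
  | 0 => d
  | Nat.succ f =>
    if frontier.length = 0 then d
    else
      let d' := d ++ [(frontier.length : Int)]
      let fv := pvBfsStep lines frontier visited
      pvDistancesGo lines f fv.1 fv.2 d'

-- helper distances (shared verbatim by A and B in Python)
def pvDistances (lines : List String) (pt : List Int) : List Int :=
  pvDistancesGo lines (lines.length * (PySem.List.pyGetD lines 0 "").toList.length + 2)
    (PySem.Set.ofList [pt]) (PySem.Set.ofList [pt]) []

-- helper taxicab_d
def pvTaxicab (origin : List Int) (p : List Int) (dim0 dim1 : Int) : Int :=
  PySem.Int.mod (dim0 - |PySem.List.pyGetD p 0 0 - PySem.List.pyGetD origin 0 0|) dim0 +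
  PySem.Int.mod (dim1 - |PySem.List.pyGetD p 1 0 - PySem.List.pyGetD origin 1 0|) dim1

-- helper reachable: the indexed for-loop with its break
def pvReachGo (remaining : Int) : List Int → Int → Int → Int
  | [], _, res => res
  | x :: xs, i, res =>
    if i > remaining then res
    else pvReachGo remaining xs (i + 1)
      (res + (if PySem.Int.mod (remaining - i) 2 = 0 then x else 0))

def pvReachable (d : List Int) (remaining : Int) : Int := pvReachGo remaining d 0 0

def sideContribution (start : List Int) (lines : List String) (S : Int) (pt : List Int) : Int :=
  let n : Int := lines.length
  let m : Int := PySem.Str.len (PySem.List.pyGetD lines 0 "")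
  let w : Int := if PySem.List.pyGetD start 0 0 = PySem.List.pyGetD pt 0 0 then m else n
  let d := pvDistances lines pt
  let initial := pvTaxicab start pt n m
  (PySem.List.pyRange 0 (PySem.Int.floordiv (S - initial) w + 1)).foldl
    (fun res b => res + pvReachable d (S - initial - b * w)) 0

-- ===== PORT B =====

-- closed-form count of offsets b ≥ 0 with b*w ≤ r and (r - b*w) even
def pvOffsetCount (r w : Int) : Int :=
  if r < 0 then 0
  else
    let q := PySem.Int.floordiv r w
    if PySem.Int.mod w 2 = 0 then (if PySem.Int.mod r 2 = 0 then q + 1 else 0)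
    else PySem.Int.floordiv (q - PySem.Int.mod r 2) 2 + 1

def sideContribution_alt (start : List Int) (lines : List String) (S : Int) (pt : List Int) : Int :=
  let n : Int := lines.length
  let m : Int := PySem.Str.len (PySem.List.pyGetD lines 0 "")
  let w : Int := if PySem.List.pyGetD start 0 0 = PySem.List.pyGetD pt 0 0 then m else n
  let d := pvDistances lines pt
  let x := PySem.Int.mod (n - |PySem.List.pyGetD pt 0 0 - PySem.List.pyGetD start 0 0|) n
  let y := PySem.Int.mod (m - |PySem.List.pyGetD pt 1 0 - PySem.List.pyGetD start 1 0|) m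
  let r0 := S - x - y
  (PySem.List.enumerate d 0).foldl (fun res p => res + p.2 * pvOffsetCount (r0 - p.1) w) 0

-- ===== PRECONDITION & SPEC =====

-- is the in-grid position (r, c) a '.' or 'S' cell? (nonneg indices only; a
-- position past the end of a short row reads none and counts as not-a-dot)
def pvIsDot (lines : List String) (r c : Int) : Bool :=
  decide (0 ≤ r) && decide (r < (lines.length : Int)) &&
  decide (0 ≤ c) && decide (c < PySem.Str.len (PySem.List.pyGetD lines 0 "")) &&
  (match PySem.Str.pyGet? (PySem.List.pyGetD lines r "") c with
   | some ch => ch == '.' || ch == 'S'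
   | none => false)

-- a ragged grid is safe when every missing cell (r, c) — row r shorter than row 0,
-- with len(lines[r]) ≤ c < len(lines[0]) — has no '.'/'S' neighbor in the grid and
-- is not adjacent to pt: the BFS only probes neighbors of pt and of dot cells, so
-- it never reads past a short row and A returns normally
def pvSafeRagged (lines : List String) (pt : List Int) : Bool :=
  (List.range lines.length).all (fun r =>
    (List.range (PySem.List.pyGetD lines 0 "").toList.length).all (fun c =>
      if PySem.Str.len (PySem.List.pyGetD lines (r : Int) "") ≤ (c : Int) then
        ([((r : Int), (c : Int) + 1), ((r : Int), (c : Int) - 1),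
          ((r : Int) - 1, (c : Int)), ((r : Int) + 1, (c : Int))]).all (fun q =>
          !(pvIsDot lines q.1 q.2) &&
          !(PySem.List.pyGetD pt 0 0 == q.1 && PySem.List.pyGetD pt 1 0 == q.2))
      else true))

-- Pre_ admits exactly A's natural domain: it excludes inputs on which A raises — an
-- empty grid or empty first row (IndexError / ZeroDivisionError), start or pt with
-- fewer than two coordinates (IndexError) — and the ragged grids on which A's BFS can
-- raise IndexError by reading past a short row: those where a missing cell of a short
-- row borders a '.'/'S' cell or pt (the only cells a probe can come from), unless pt
-- lies strictly outside the grid's neighborhood so the BFS probes nothing at all.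
-- Whether such a bordering dot is actually reached depends on the BFS itself, so a few
-- grids where it is walled off from pt are excluded although A returns (see cites).
def Pre_sideContribution (start : List Int) (lines : List String) (S : Int) (pt : List Int) : Prop :=
  lines ≠ [] ∧ 0 < PySem.Str.len (PySem.List.pyGetD lines 0 "") ∧
  2 ≤ start.length ∧ 2 ≤ pt.length ∧
  ((PySem.List.pyGetD pt 0 0 < -1 ∨ (lines.length : Int) < PySem.List.pyGetD pt 0 0 ∨
    PySem.List.pyGetD pt 1 0 < -1 ∨ PySem.Str.len (PySem.List.pyGetD lines 0 "") < PySem.List.pyGetD pt 1 0) ∨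
   pvSafeRagged lines pt = true)

instance (start : List Int) (lines : List String) (S : Int) (pt : List Int) : Decidable (Pre_sideContribution start lines S pt) := by unfold Pre_sideContribution; infer_instance

def pvWitness_sideContribution : List Int × List String × Int × List Int := ([0, 0], ["S"], 0, [0, 0])

def Spec_sideContribution (start : List Int) (lines : List String) (S : Int) (pt : List Int) (out : Int) : Prop := out = sideContribution_alt start lines S pt
instance (start : List Int) (lines : List String) (S : Int) (pt : List Int) (out : Int) : Decidable (Spec_sideContribution start lines S pt out) := by unfold Spec_sideContribution; infer_instance

-- ===== CLAIM (what is proved, stated in full; the proofs are below) =====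
def Claim_equal_sideContribution : Prop := ∀ (start : List Int) (lines : List String) (S : Int) (pt : List Int), Dom_sideContribution start lines S pt → Pre_sideContribution start lines S pt → Spec_sideContribution start lines S pt (sideContribution start lines S pt)

-- ===== LEMMAS AND PROOFS =====

-- unvisited suffix of the break: once i exceeds remaining, every later index does too
theorem pv_sum_zero_of_gt (r : Int) :
    ∀ (xs : List Int) (i : Int), r < i →
      ((PySem.List.enumerate xs i).map
        (fun p => if p.1 ≤ r ∧ PySem.Int.mod (r - p.1) 2 = 0 then p.2 else 0)).sum = 0 := by
  intro xs
  induction xs with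
  | nil => intro i _; simp [PySem.List.enumerate_nil]
  | cons x xs ih =>
    intro i hi
    rw [PySem.List.enumerate_cons]
    simp only [List.map_cons, List.sum_cons]
    rw [if_neg (by omega), ih (i + 1) (by omega)]
    ring

-- A's reachable loop as a sum over the enumerated histogram
theorem pv_reachGo_eq (r : Int) :
    ∀ (xs : List Int) (i res : Int),
      pvReachGo r xs i res = res +
        ((PySem.List.enumerate xs i).map
          (fun p => if p.1 ≤ r ∧ PySem.Int.mod (r - p.1) 2 = 0 then p.2 else 0)).sum := by
  intro xs
  induction xs with
  | nil => intro i res; simp [pvReachGo, PySem.List.enumerate_nil]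
  | cons x xs ih =>
    intro i res
    rw [PySem.List.enumerate_cons]
    simp only [List.map_cons, List.sum_cons]
    by_cases h : i > r
    · rw [pvReachGo, if_pos h, if_neg (by omega), pv_sum_zero_of_gt r xs (i + 1) (by omega)]
      ring
    · rw [pvReachGo, if_neg h, ih (i + 1)]
      have hir : i ≤ r := by omega
      by_cases hp : PySem.Int.mod (r - i) 2 = 0 <;> simp [hp, hir] <;> ring

-- exchange the two summations
theorem pv_sum_swap {α β : Type} (l1 : List α) (l2 : List β) (g : α → β → Int) :
    (l1.map (fun a => (l2.map (fun b => g a b)).sum)).sum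
      = (l2.map (fun b => (l1.map (fun a => g a b)).sum)).sum := by
  induction l1 with
  | nil => simp
  | cons a l1 ih =>
    simp only [List.map_cons, List.sum_cons, ih]
    rw [← PySem.List.sum_map_add_int]

-- closed form of the parity-filtered constant sum over b = 0..Q
theorem pv_parity_sum (x r w : Int) : ∀ (Q : Nat),
    ((PySem.List.pyRange 0 ((Q : Int) + 1)).map
        (fun b => if PySem.Int.mod (r - b * w) 2 = 0 then x else 0)).sum
      = x * (if w % 2 = 0 then (if r % 2 = 0 then (Q : Int) + 1 else 0)
             else ((Q : Int) - r % 2) / 2 + 1) := by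
  have hmod : ∀ a : Int, PySem.Int.mod a 2 = a % 2 := fun a =>
    PySem.Int.mod_eq_emod_of_pos (by norm_num)
  intro Q
  induction Q with
  | zero =>
    push_cast
    have h1 : PySem.List.pyRange (0:Int) 1 = [0] := PySem.List.pyRange_one_singleton 0
    rw [h1]
    simp only [List.map_cons, List.map_nil, List.sum_cons, List.sum_nil, hmod]
    have hw2 : w % 2 = 0 ∨ w % 2 = 1 := by omega
    have hr2 : r % 2 = 0 ∨ r % 2 = 1 := by omega
    have hz : (r - 0 * w) % 2 = r % 2 := by ring_nf
    rw [hz]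
    rcases hw2 with h | h <;> rcases hr2 with h' | h' <;> simp [h, h']
  | succ Q ih =>
    have hsplit : PySem.List.pyRange 0 ((Q:Int) + 1 + 1) = PySem.List.pyRange 0 ((Q:Int) + 1) ++ [(Q:Int) + 1] := by
      exact PySem.List.pyRange_one_succ_right (by positivity)
    push_cast
    rw [hsplit]
    rw [List.map_append, List.sum_append, ih]
    simp only [List.map_cons, List.map_nil, List.sum_cons, List.sum_nil, hmod]
    have hc : (r - ((Q:Int) + 1) * w) % 2 = (r % 2 - (((Q:Int) + 1) % 2) * (w % 2)) % 2 := by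
      conv_lhs => rw [Int.sub_emod, Int.mul_emod]
      rw [Int.sub_emod (r % 2)]
      simp [Int.emod_emod_of_dvd]
    have hw2 : w % 2 = 0 ∨ w % 2 = 1 := by omega
    have hr2 : r % 2 = 0 ∨ r % 2 = 1 := by omega
    rcases hw2 with hw2 | hw2 <;> rcases hr2 with hr2 | hr2
    · simp only [hw2, hr2, hc]; norm_num; ring
    · simp only [hw2, hr2, hc]; norm_num
    · simp only [hw2, hr2, hc]; norm_num
      by_cases hd : (2:Int) ∣ (Q:Int) + 1
      · rw [if_pos hd]
        have h2 : ((Q:Int) + 1) / 2 = (Q:Int) / 2 + 1 := by omega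
        rw [h2]; ring
      · rw [if_neg hd]
        have h2 : ((Q:Int) + 1) / 2 = (Q:Int) / 2 := by omega
        rw [h2]; ring
    · simp only [hw2, hr2, hc]; norm_num
      by_cases hd : (2:Int) ∣ (Q:Int)
      · rw [if_pos hd]
        have h2 : (Q:Int) / 2 = ((Q:Int) - 1) / 2 + 1 := by omega
        rw [h2]; ring
      · rw [if_neg hd]
        have h2 : (Q:Int) / 2 = ((Q:Int) - 1) / 2 := by omega
        rw [h2]; ring

-- the inner sum over all offsets b for one fixed distance i
theorem pv_inner (x i r0 w : Int) (hw : 0 < w) (hi : 0 ≤ i) :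
    ((PySem.List.pyRange 0 (PySem.Int.floordiv r0 w + 1)).map
        (fun b => if i ≤ r0 - b * w ∧ PySem.Int.mod (r0 - b * w - i) 2 = 0 then x else 0)).sum
      = x * pvOffsetCount (r0 - i) w := by
  have hK : PySem.Int.floordiv r0 w = r0 / w := PySem.Int.floordiv_eq_ediv_of_pos hw
  by_cases hr : r0 - i < 0
  · have hz : ((PySem.List.pyRange 0 (PySem.Int.floordiv r0 w + 1)).map
        (fun b => if i ≤ r0 - b * w ∧ PySem.Int.mod (r0 - b * w - i) 2 = 0 then x else 0)).sum
        = ((PySem.List.pyRange 0 (PySem.Int.floordiv r0 w + 1)).map (fun _ => (0:Int))).sum := by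
      congr 1
      apply List.map_congr_left
      intro b hb
      have hb0 : 0 ≤ b := (PySem.List.mem_pyRange_one.mp hb).1
      have : 0 ≤ b * w := mul_nonneg hb0 (le_of_lt hw)
      rw [if_neg (by omega)]
    rw [hz, pvOffsetCount, if_pos hr]
    simp
  · push_neg at hr
    set q : Int := (r0 - i) / w with hq
    have hq0 : 0 ≤ q := Int.ediv_nonneg hr (le_of_lt hw)
    have hqK : q ≤ r0 / w := Int.ediv_le_ediv hw (by omega)
    have hbrL : q * w ≤ r0 - i := Int.ediv_mul_le (r0 - i) (ne_of_gt hw)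
    have hbrR : r0 - i < (q + 1) * w := Int.lt_ediv_add_one_mul_self (r0 - i) hw
    rw [hK, PySem.List.pyRange_one_append 0 (q + 1) (r0 / w + 1) (by omega) (by omega)]
    rw [List.map_append, List.sum_append]
    have htail : ((PySem.List.pyRange (q + 1) (r0 / w + 1)).map
        (fun b => if i ≤ r0 - b * w ∧ PySem.Int.mod (r0 - b * w - i) 2 = 0 then x else 0)).sum = 0 := by
      have hc : ((PySem.List.pyRange (q + 1) (r0 / w + 1)).map
          (fun b => if i ≤ r0 - b * w ∧ PySem.Int.mod (r0 - b * w - i) 2 = 0 then x else 0))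
          = ((PySem.List.pyRange (q + 1) (r0 / w + 1)).map (fun _ => (0:Int))) := by
        apply List.map_congr_left
        intro b hb
        have hb1 : q + 1 ≤ b := (PySem.List.mem_pyRange_one.mp hb).1
        have : (q + 1) * w ≤ b * w := mul_le_mul_of_nonneg_right hb1 (le_of_lt hw)
        rw [if_neg (by omega)]
      rw [hc]; simp
    rw [htail, add_zero]
    have hhead : ((PySem.List.pyRange 0 (q + 1)).map
        (fun b => if i ≤ r0 - b * w ∧ PySem.Int.mod (r0 - b * w - i) 2 = 0 then x else 0))
        = ((PySem.List.pyRange 0 (q + 1)).map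
        (fun b => if PySem.Int.mod ((r0 - i) - b * w) 2 = 0 then x else 0)) := by
      apply List.map_congr_left
      intro b hb
      have hb0 : 0 ≤ b := (PySem.List.mem_pyRange_one.mp hb).1
      have hb1 : b < q + 1 := (PySem.List.mem_pyRange_one.mp hb).2
      have hle : b * w ≤ q * w := mul_le_mul_of_nonneg_right (by omega) (le_of_lt hw)
      have hcond : i ≤ r0 - b * w := by omega
      have harg : r0 - b * w - i = (r0 - i) - b * w := by ring
      rw [harg]
      by_cases hp : PySem.Int.mod ((r0 - i) - b * w) 2 = 0 <;> simp [hp, hcond]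
    rw [hhead]
    have hcast : ((q.toNat : Int)) = q := Int.toNat_of_nonneg hq0
    have hps := pv_parity_sum x (r0 - i) w q.toNat
    rw [hcast] at hps
    rw [hps]
    have hmod2 : ∀ a : Int, PySem.Int.mod a 2 = a % 2 := fun a =>
      PySem.Int.mod_eq_emod_of_pos (by norm_num)
    have hfd : PySem.Int.floordiv (r0 - i) w = q := PySem.Int.floordiv_eq_ediv_of_pos hw
    have hfd2 : PySem.Int.floordiv (q - (r0 - i) % 2) 2 = (q - (r0 - i) % 2) / 2 :=
      PySem.Int.floordiv_eq_ediv_of_pos (by norm_num)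
    simp only [pvOffsetCount, hmod2, hfd, hfd2, if_neg (show ¬ (r0 - i < 0) by omega)]

-- the core identity between the two loop shapes
theorem pv_main (d : List Int) (r0 w : Int) (hw : 0 < w) :
    (PySem.List.pyRange 0 (PySem.Int.floordiv r0 w + 1)).foldl
        (fun res b => res + pvReachable d (r0 - b * w)) 0
      = (PySem.List.enumerate d 0).foldl
        (fun res p => res + p.2 * pvOffsetCount (r0 - p.1) w) 0 := by
  rw [PySem.List.foldl_add, PySem.List.foldl_add, zero_add, zero_add]
  have h1 : (PySem.List.pyRange 0 (PySem.Int.floordiv r0 w + 1)).map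
      (fun b => pvReachable d (r0 - b * w))
      = (PySem.List.pyRange 0 (PySem.Int.floordiv r0 w + 1)).map
      (fun b => ((PySem.List.enumerate d 0).map
          (fun p => if p.1 ≤ r0 - b * w ∧ PySem.Int.mod (r0 - b * w - p.1) 2 = 0 then p.2 else 0)).sum) := by
    apply List.map_congr_left
    intro b _
    rw [pvReachable, pv_reachGo_eq, zero_add]
  rw [h1, pv_sum_swap]
  apply congrArg
  apply List.map_congr_left
  intro p hp
  rcases (PySem.List.mem_enumerate_iff d 0 p).mp hp with ⟨k, hk, rfl⟩
  exact pv_inner _ _ r0 w hw (by simp)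

-- ===== VERDICT (by name: the statement is the Claim_ definition above) =====
theorem sideContribution_spec : Claim_equal_sideContribution := by
  intro start lines S pt _ hpre
  obtain ⟨hne, hm, _, _, _⟩ := hpre
  have hn : 0 < (lines.length : Int) := by
    have := List.length_pos_iff.mpr hne
    exact_mod_cast this
  unfold Spec_sideContribution sideContribution sideContribution_alt
  dsimp only
  have hw : 0 < (if PySem.List.pyGetD start 0 0 = PySem.List.pyGetD pt 0 0
      then PySem.Str.len (PySem.List.pyGetD lines 0 "") else (lines.length : Int)) := by
    split_ifs <;> assumption
  have harg : S - PySem.Int.mod ((lines.length : Int) - |PySem.List.pyGetD pt 0 0 - PySem.List.pyGetD start 0 0|) (lines.length : Int)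
      - PySem.Int.mod (PySem.Str.len (PySem.List.pyGetD lines 0 "") - |PySem.List.pyGetD pt 1 0 - PySem.List.pyGetD start 1 0|) (PySem.Str.len (PySem.List.pyGetD lines 0 ""))
      = S - pvTaxicab start pt (lines.length : Int) (PySem.Str.len (PySem.List.pyGetD lines 0 "")) := by
    rw [pvTaxicab]; ring
  rw [harg]
  exact pv_main _ _ _ hw
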